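-- pv_equiv track=rewrite | github.com/AMEENA-NAZRIN/vulnERR | backend/app.py | parse_vulnerabilities
-- ===== SOURCE A (Python) =====
-- def parse_vulnerabilities(html):
--
--     vulns = []
--
--     parts = html.split("<h3>")
--
--     for part in parts[1:]:  # skip first empty section
--
--         section = part.split("</h3>", 1)
--
--         if len(section) < 2:
--             continue
--
--         title = section[0].strip()
--         body = section[1].strip()
--
--         vulns.append({
--             "title": title,
--             "fix": body
--         })
--
--     return vulns
-- ===== SOURCE B (Python) =====
-- def parse_vulnerabilities(html):
--     # single left-to-right scan with find/slicing instead of building split lists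
--     vulns = []
--     i = html.find("<h3>")
--     while i != -1:
--         rest = html[i + 4:]
--         j = rest.find("<h3>")
--         part = rest if j == -1 else rest[:j]
--         k = part.find("</h3>")
--         if k != -1:
--             vulns.append({"title": part[:k].strip(), "fix": part[k + 5:].strip()})
--         html = rest
--         i = j
--     return vulns
-- ===== Notes on version B (the rewrite author's own statement) =====
-- stated objective: alternative
-- what changed: Replaces A's two-level split (split the whole string on "<h3>" into a list of parts, then split each part again on "</h3>") with a single left-to-right find/slice scan that walks the string once, locating each section's bounds with str.find and slicing title and fix out directly.
import Mathlib
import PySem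

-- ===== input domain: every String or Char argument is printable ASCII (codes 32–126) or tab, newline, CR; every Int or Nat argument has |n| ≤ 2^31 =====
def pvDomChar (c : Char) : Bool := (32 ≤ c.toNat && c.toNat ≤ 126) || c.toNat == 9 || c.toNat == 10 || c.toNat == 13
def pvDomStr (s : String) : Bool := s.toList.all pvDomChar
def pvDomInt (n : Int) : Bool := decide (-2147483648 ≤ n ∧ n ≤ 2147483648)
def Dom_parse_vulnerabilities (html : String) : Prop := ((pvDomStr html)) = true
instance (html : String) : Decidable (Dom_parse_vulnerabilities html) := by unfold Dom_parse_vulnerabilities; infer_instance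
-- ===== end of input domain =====

-- B replaces A's two-level split (split on "<h3>", then split each part on "</h3>") by a single
-- left-to-right find/slice scan over the string; same return value, no speed claim (objective: alternative).

-- ===== PORT A =====
-- A: parts = html.split("<h3>"); for part in parts[1:]: section = part.split("</h3>", 1); skip if len < 2;
--    vulns.append({"title": section[0].strip(), "fix": section[1].strip()})
def parse_vulnerabilities (html : String) : List (List (String × String)) :=
  match PySem.Str.split? html "<h3>" with
  | none => []        -- unreachable: the separator "<h3>" is nonempty
  | some parts =>
    (PySem.List.slice parts (some 1) none).foldl (fun vulns part =>
      match PySem.Str.splitMax? part "</h3>" 1 with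
      | none => vulns -- unreachable: the separator "</h3>" is nonempty
      | some sect =>
        match sect with
        | s0 :: s1 :: _ =>
          vulns ++ [[("title", PySem.Str.strip s0), ("fix", PySem.Str.strip s1)]]
        | _ => vulns) []     -- len(section) < 2: continue

-- ===== PORT B =====
def pvH3 : List Char := ['<', 'h', '3', '>']
def pvH3c : List Char := ['<', '/', 'h', '3', '>']

-- the while loop of Source B as a tail recursion on its loop state (html→rest, i, vulns);
-- the hypothesis h records the loop invariant i = rest.find("<h3>") and is used only for termination
def pvGoB (rest : List Char) (i : Int) (vulns : List (List (String × String)))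
    (h : i = PySem.Chars.find rest pvH3) : List (List (String × String)) :=
  if hi : i = -1 then vulns
  else
    let rest' := PySem.List.slice rest (some (i + 4)) none
    let j := PySem.Chars.find rest' pvH3
    let part := if j = -1 then rest' else PySem.List.slice rest' none (some j)
    let k := PySem.Chars.find part pvH3c
    let vulns' :=
      if k = -1 then vulns
      else vulns ++ [[("title", String.ofList (PySem.Chars.strip (PySem.List.slice part none (some k)))),
                      ("fix", String.ofList (PySem.Chars.strip (PySem.List.slice part (some (k + 5)) none)))]]
    pvGoB rest' j vulns' rfl
  termination_by rest.length
  decreasing_by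
    subst h
    have h0 : 0 ≤ PySem.Chars.find rest pvH3 := by
      have := PySem.Chars.neg_one_le_find rest pvH3; omega
    have hsp := (PySem.Chars.find_spec (s := rest) (sub := pvH3) h0).1
    have hlen := hsp.length_le
    rw [List.length_drop] at hlen
    have h4 : pvH3.length = 4 := rfl
    rw [PySem.List.slice_from rest (show (0:Int) ≤ PySem.Chars.find rest pvH3 + 4 by omega)]
    rw [List.length_drop]
    omega

def parse_vulnerabilities_alt (html : String) : List (List (String × String)) :=
  pvGoB html.toList (PySem.Str.find html "<h3>") [] (by rw [PySem.Str.find_eq]; rfl)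

-- ===== PRECONDITION & SPEC =====
def Spec_parse_vulnerabilities (html : String) (out : List (List (String × String))) : Prop := out = parse_vulnerabilities_alt html
instance (html : String) (out : List (List (String × String))) : Decidable (Spec_parse_vulnerabilities html out) := by unfold Spec_parse_vulnerabilities; infer_instance

-- ===== CLAIM (what is proved, stated in full; the proofs are below) =====
def Claim_equal_parse_vulnerabilities : Prop := ∀ (html : String), Dom_parse_vulnerabilities html → Spec_parse_vulnerabilities html (parse_vulnerabilities html)

-- ===== LEMMAS AND PROOFS =====

-- proof-side: unfuelled form of PySem.Chars.splitOn.go / splitOnMax.go (maxsplit = 1)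
def pvSplit (sep : List Char) : List Char → List Char → List (List Char)
  | [], cur => [cur.reverse]
  | c :: rest, cur =>
    if sep.isPrefixOf (c :: rest) then cur.reverse :: pvSplit sep (rest.drop (sep.length - 1)) []
    else pvSplit sep rest (c :: cur)
  termination_by l _ => l.length
  decreasing_by
    all_goals simp only [List.length_drop, List.length_cons]
    all_goals omega

def pvSplit1 (sep : List Char) : List Char → List Char → List (List Char)
  | [], cur => [cur.reverse]
  | c :: rest, cur =>
    if sep.isPrefixOf (c :: rest) then [cur.reverse, rest.drop (sep.length - 1)]
    else pvSplit1 sep rest (c :: cur)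

-- per-part value both programs produce (B's inner body, in take/drop form)
def pvG (part : List Char) : List (List (String × String)) :=
  let k := PySem.Chars.find part pvH3c
  if k = -1 then []
  else [[("title", String.ofList (PySem.Chars.strip (part.take k.toNat))),
         ("fix", String.ofList (PySem.Chars.strip (part.drop (k.toNat + 5))))]]

theorem pvGo_eq (sep : List Char) (hsep : sep ≠ []) :
    ∀ (fuel : Nat) (l cur : List Char) (acc : List (List Char)), l.length < fuel →
      PySem.Chars.splitOn.go sep fuel l cur acc = acc.reverse ++ pvSplit sep l cur := by
  intro fuel
  induction fuel with
  | zero => intro l cur acc h; omega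
  | succ n ih =>
    intro l cur acc h
    cases l with
    | nil => simp [PySem.Chars.splitOn.go, pvSplit]
    | cons c rest =>
      rw [PySem.Chars.splitOn.go]
      rw [pvSplit]
      by_cases hp : sep.isPrefixOf (c :: rest)
      · simp only [hp, if_true]
        have hsl : 1 ≤ sep.length := by
          cases sep with
          | nil => exact absurd rfl hsep
          | cons a t => simp
        have hd : (c :: rest).drop sep.length = rest.drop (sep.length - 1) := by
          obtain ⟨m, hm⟩ : ∃ m, sep.length = m + 1 := ⟨sep.length - 1, by omega⟩
          rw [hm]; simp
        rw [hd]
        have hlt : (rest.drop (sep.length - 1)).length < n := by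
          rw [List.length_drop]; simp only [List.length_cons] at h; omega
        rw [ih _ _ _ hlt]
        simp
      · have hlt : rest.length < n := by simp only [List.length_cons] at h; omega
        simp only [hp]
        rw [ih _ _ _ hlt]
        simp

theorem pvSplitOn_eq (s sep : List Char) (hsep : sep ≠ []) :
    PySem.Chars.splitOn s sep = pvSplit sep s [] := by
  rw [PySem.Chars.splitOn]
  rw [pvGo_eq sep hsep (s.length + 1) s [] [] (by omega)]
  simp

theorem pvGoMax0_eq (sep : List Char) :
    ∀ (fuel : Nat) (l cur : List Char) (acc : List (List Char)), l.length < fuel →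
      PySem.Chars.splitOnMax.go sep fuel 0 l cur acc = acc.reverse ++ [cur.reverse ++ l] := by
  intro fuel l cur acc h
  match fuel, l with
  | 0, l => omega
  | n+1, [] => simp [PySem.Chars.splitOnMax.go]
  | n+1, c :: rest => rw [PySem.Chars.splitOnMax.go]; simp

theorem pvGoMax1_eq (sep : List Char) (hsep : sep ≠ []) :
    ∀ (fuel : Nat) (l cur : List Char) (acc : List (List Char)), l.length < fuel →
      PySem.Chars.splitOnMax.go sep fuel 1 l cur acc = acc.reverse ++ pvSplit1 sep l cur := by
  intro fuel
  induction fuel with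
  | zero => intro l cur acc h; omega
  | succ n ih =>
    intro l cur acc h
    cases l with
    | nil => simp [PySem.Chars.splitOnMax.go, pvSplit1]
    | cons c rest =>
      rw [PySem.Chars.splitOnMax.go]
      rw [pvSplit1]
      by_cases hp : sep.isPrefixOf (c :: rest)
      · simp only [hp, if_true]
        have hsl : 1 ≤ sep.length := by
          cases sep with
          | nil => exact absurd rfl hsep
          | cons a t => simp
        have hd : (c :: rest).drop sep.length = rest.drop (sep.length - 1) := by
          obtain ⟨m, hm⟩ : ∃ m, sep.length = m + 1 := ⟨sep.length - 1, by omega⟩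
          rw [hm]; simp
        have hlt : ((c :: rest).drop sep.length).length < n := by
          rw [hd, List.length_drop]; simp only [List.length_cons] at h; omega
        norm_num
        rw [pvGoMax0_eq sep n _ _ _ hlt]
        rw [hd]
        simp
      · have hlt : rest.length < n := by simp only [List.length_cons] at h; omega
        simp only [hp]
        norm_num
        rw [ih _ _ _ hlt]

theorem pvSplitOnMax1_eq (s sep : List Char) (hsep : sep ≠ []) :
    PySem.Chars.splitOnMax s sep 1 = pvSplit1 sep s [] := by
  rw [PySem.Chars.splitOnMax]
  norm_num
  rw [pvGoMax1_eq sep hsep (s.length + 1) s [] [] (by omega)]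
  simp

-- find points at the first occurrence, so a first occurrence determines find
theorem pvFind_first (s sub : List Char) (k : Nat) (hk : sub <+: s.drop k)
    (hfirst : ∀ i < k, ¬ sub <+: s.drop i) : PySem.Chars.find s sub = (k : Int) := by
  have hinf : sub <:+: s := hk.isInfix.trans (s.drop_suffix k).isInfix
  have h0 : 0 ≤ PySem.Chars.find s sub := (PySem.Chars.find_nonneg_iff s sub).2 hinf
  have hsp := PySem.Chars.find_spec (s := s) (sub := sub) h0
  rcases lt_trichotomy (PySem.Chars.find s sub).toNat k with h | h | h
  · exact absurd hsp.1 (hfirst _ h)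
  · omega
  · exact absurd hk (hsp.2 k h)

theorem pvFind_cons (c : Char) (rest sub : List Char) (hp : ¬ sub <+: (c :: rest)) :
    PySem.Chars.find (c :: rest) sub =
      (if PySem.Chars.find rest sub = -1 then -1 else PySem.Chars.find rest sub + 1) := by
  by_cases hr : PySem.Chars.find rest sub = -1
  · simp only [hr, if_true]
    rw [PySem.Chars.find_eq_neg_one_iff] at hr ⊢
    intro hinf
    rcases List.infix_cons_iff.1 hinf with h | h
    · exact hp h
    · exact hr h
  · simp only [hr, if_false]
    have h0 : 0 ≤ PySem.Chars.find rest sub := by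
      have := PySem.Chars.neg_one_le_find rest sub; omega
    have hsp := PySem.Chars.find_spec (s := rest) (sub := sub) h0
    have := pvFind_first (c :: rest) sub ((PySem.Chars.find rest sub).toNat + 1)
      (by simpa using hsp.1)
      (by
        intro i hi
        cases i with
        | zero => simpa using hp
        | succ i' => simpa using hsp.2 i' (by omega))
    rw [this]
    omega

theorem pvSplit_find (sep : List Char) (hsep : sep ≠ []) :
    ∀ (l cur : List Char),
      pvSplit sep l cur =
        if PySem.Chars.find l sep = -1 then [cur.reverse ++ l]
        else (cur.reverse ++ l.take (PySem.Chars.find l sep).toNat) ::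
          pvSplit sep (l.drop ((PySem.Chars.find l sep).toNat + sep.length)) [] := by
  intro l
  have hsl : 1 ≤ sep.length := by
    cases sep with
    | nil => exact absurd rfl hsep
    | cons a t => simp
  induction l with
  | nil =>
    intro cur
    have : PySem.Chars.find [] sep = -1 := by
      rw [PySem.Chars.find_eq_neg_one_iff]
      intro h
      rw [List.infix_nil] at h
      exact hsep h
    simp [pvSplit, this]
  | cons c rest ih =>
    intro cur
    rw [pvSplit]
    by_cases hp : sep.isPrefixOf (c :: rest)
    · have hpre : sep <+: (c :: rest) := List.isPrefixOf_iff_prefix.1 hp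
      have hf : PySem.Chars.find (c :: rest) sep = ((0 : Nat) : Int) :=
        pvFind_first _ _ 0 (by simpa using hpre) (by omega)
      have hd : (c :: rest).drop sep.length = rest.drop (sep.length - 1) := by
        obtain ⟨m, hm⟩ : ∃ m, sep.length = m + 1 := ⟨sep.length - 1, by omega⟩
        rw [hm]; simp
      simp only [hp, if_true, hf]
      norm_num
      rw [← hd]
    · have hpre : ¬ sep <+: (c :: rest) := fun h => hp (List.isPrefixOf_iff_prefix.2 h)
      have hf := pvFind_cons c rest sep hpre
      simp only [hp]
      norm_num
      rw [ih (c :: cur)]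
      by_cases hr : PySem.Chars.find rest sep = -1
      · simp [hf, hr]
      · have h0 : 0 ≤ PySem.Chars.find rest sep := by
          have := PySem.Chars.neg_one_le_find rest sep; omega
        have hfv : PySem.Chars.find (c :: rest) sep = PySem.Chars.find rest sep + 1 := by
          rw [hf]; simp [hr]
        have hne : ¬ PySem.Chars.find (c :: rest) sep = -1 := by omega
        simp only [hr, if_false, hfv]
        have ht : (PySem.Chars.find rest sep + 1).toNat = (PySem.Chars.find rest sep).toNat + 1 := by
          omega
        rw [ht]
        simp only [List.take_succ_cons]
        have hdrop : List.drop ((PySem.Chars.find rest sep).toNat + 1 + sep.length) (c :: rest)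
            = List.drop ((PySem.Chars.find rest sep).toNat + sep.length) rest := by
          have he : (PySem.Chars.find rest sep).toNat + 1 + sep.length
              = ((PySem.Chars.find rest sep).toNat + sep.length) + 1 := by omega
          rw [he, List.drop_succ_cons]
        rw [if_neg (by omega), hdrop]
        simp

theorem pvSplit1_find (sep : List Char) (hsep : sep ≠ []) :
    ∀ (l cur : List Char),
      pvSplit1 sep l cur =
        if PySem.Chars.find l sep = -1 then [cur.reverse ++ l]
        else [cur.reverse ++ l.take (PySem.Chars.find l sep).toNat,
              l.drop ((PySem.Chars.find l sep).toNat + sep.length)] := by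
  intro l
  have hsl : 1 ≤ sep.length := by
    cases sep with
    | nil => exact absurd rfl hsep
    | cons a t => simp
  induction l with
  | nil =>
    intro cur
    have : PySem.Chars.find [] sep = -1 := by
      rw [PySem.Chars.find_eq_neg_one_iff]
      intro h
      rw [List.infix_nil] at h
      exact hsep h
    simp [pvSplit1, this]
  | cons c rest ih =>
    intro cur
    rw [pvSplit1]
    by_cases hp : sep.isPrefixOf (c :: rest)
    · have hpre : sep <+: (c :: rest) := List.isPrefixOf_iff_prefix.1 hp
      have hf : PySem.Chars.find (c :: rest) sep = ((0 : Nat) : Int) :=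
        pvFind_first _ _ 0 (by simpa using hpre) (by omega)
      have hd : (c :: rest).drop sep.length = rest.drop (sep.length - 1) := by
        obtain ⟨m, hm⟩ : ∃ m, sep.length = m + 1 := ⟨sep.length - 1, by omega⟩
        rw [hm]; simp
      simp only [hp, if_true, hf]
      norm_num
      rw [← hd]
    · have hpre : ¬ sep <+: (c :: rest) := fun h => hp (List.isPrefixOf_iff_prefix.2 h)
      have hf := pvFind_cons c rest sep hpre
      simp only [hp]
      norm_num
      rw [ih (c :: cur)]
      by_cases hr : PySem.Chars.find rest sep = -1
      · simp [hf, hr]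
      · have h0 : 0 ≤ PySem.Chars.find rest sep := by
          have := PySem.Chars.neg_one_le_find rest sep; omega
        have hfv : PySem.Chars.find (c :: rest) sep = PySem.Chars.find rest sep + 1 := by
          rw [hf]; simp [hr]
        have ht : (PySem.Chars.find rest sep + 1).toNat = (PySem.Chars.find rest sep).toNat + 1 := by
          omega
        simp only [hr, if_false, hfv, ht]
        simp only [List.take_succ_cons]
        have hdrop : List.drop ((PySem.Chars.find rest sep).toNat + 1 + sep.length) (c :: rest)
            = List.drop ((PySem.Chars.find rest sep).toNat + sep.length) rest := by
          have he : (PySem.Chars.find rest sep).toNat + 1 + sep.length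
              = ((PySem.Chars.find rest sep).toNat + sep.length) + 1 := by omega
          rw [he, List.drop_succ_cons]
        rw [if_neg (by omega), hdrop]
        simp

theorem pvFind_nil (sep : List Char) (hsep : sep ≠ []) : PySem.Chars.find [] sep = -1 := by
  rw [PySem.Chars.find_eq_neg_one_iff]
  intro h
  rw [List.infix_nil] at h
  exact hsep h

theorem pvSplitOn_neg (s : List Char) (hf : PySem.Chars.find s pvH3 = -1) :
    PySem.Chars.splitOn s pvH3 = [s] := by
  rw [pvSplitOn_eq s pvH3 (by decide), pvSplit_find pvH3 (by decide) s [], if_pos hf]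
  simp

theorem pvSplitOn_pos (s : List Char) (hf : PySem.Chars.find s pvH3 ≠ -1) :
    PySem.Chars.splitOn s pvH3 =
      s.take (PySem.Chars.find s pvH3).toNat ::
        PySem.Chars.splitOn (s.drop ((PySem.Chars.find s pvH3).toNat + 4)) pvH3 := by
  rw [pvSplitOn_eq s pvH3 (by decide), pvSplit_find pvH3 (by decide) s [], if_neg hf]
  rw [pvSplitOn_eq _ pvH3 (by decide)]
  have h4 : pvH3.length = 4 := rfl
  rw [h4]
  simp

theorem pvSplitOnMax1_neg (s : List Char) (hf : PySem.Chars.find s pvH3c = -1) :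
    PySem.Chars.splitOnMax s pvH3c 1 = [s] := by
  rw [pvSplitOnMax1_eq s pvH3c (by decide), pvSplit1_find pvH3c (by decide) s [], if_pos hf]
  simp

theorem pvSplitOnMax1_pos (s : List Char) (hf : PySem.Chars.find s pvH3c ≠ -1) :
    PySem.Chars.splitOnMax s pvH3c 1 =
      [s.take (PySem.Chars.find s pvH3c).toNat,
       s.drop ((PySem.Chars.find s pvH3c).toNat + 5)] := by
  rw [pvSplitOnMax1_eq s pvH3c (by decide), pvSplit1_find pvH3c (by decide) s [], if_neg hf]
  have h5 : pvH3c.length = 5 := rfl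
  rw [h5]
  simp

-- B's per-part conditional append equals appending pvG
theorem pvVulns_eq (part : List Char) (vulns : List (List (String × String))) :
    (if PySem.Chars.find part pvH3c = -1 then vulns
     else vulns ++ [[("title", String.ofList (PySem.Chars.strip
                        (PySem.List.slice part none (some (PySem.Chars.find part pvH3c))))),
                     ("fix", String.ofList (PySem.Chars.strip
                        (PySem.List.slice part (some (PySem.Chars.find part pvH3c + 5)) none)))]])
    = vulns ++ pvG part := by
  unfold pvG
  by_cases hk : PySem.Chars.find part pvH3c = -1
  · simp [hk]
  · have h0 : 0 ≤ PySem.Chars.find part pvH3c := by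
      have := PySem.Chars.neg_one_le_find part pvH3c; omega
    rw [if_neg hk, if_neg hk]
    rw [PySem.List.slice_to part h0]
    rw [PySem.List.slice_from part (show (0:Int) ≤ PySem.Chars.find part pvH3c + 5 by omega)]
    have ht : (PySem.Chars.find part pvH3c + 5).toNat = (PySem.Chars.find part pvH3c).toNat + 5 := by
      omega
    rw [ht]

-- A's loop body on one part equals appending pvG
theorem pvAstep (part : List Char) (vulns : List (List (String × String))) :
    (match PySem.Str.splitMax? (String.ofList part) "</h3>" 1 with
     | none => vulns
     | some sect =>
       match sect with
       | s0 :: s1 :: _ =>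
         vulns ++ [[("title", PySem.Str.strip s0), ("fix", PySem.Str.strip s1)]]
       | _ => vulns)
    = vulns ++ pvG part := by
  rw [PySem.Str.splitMax?, PySem.Chars.splitMax?]
  rw [if_neg (by decide)]
  simp only [String.toList_ofList, show ("</h3>" : String).toList = pvH3c from rfl]
  by_cases hk : PySem.Chars.find part pvH3c = -1
  · rw [pvSplitOnMax1_neg part hk]
    simp only [Option.map_some, List.map_cons, List.map_nil]
    unfold pvG
    simp [hk]
  · rw [pvSplitOnMax1_pos part hk]
    simp only [Option.map_some, List.map_cons, List.map_nil]
    unfold pvG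
    rw [if_neg hk]
    simp only [List.append_cancel_left_eq]
    have hstrip : ∀ l : List Char, PySem.Str.strip (String.ofList l)
        = String.ofList (PySem.Chars.strip l) := by
      intro l
      rw [PySem.Str.strip, String.toList_ofList]
    rw [hstrip, hstrip]


-- main loop lemma: pvGoB computes the flatMap of pvG over the remaining sections
theorem pvGoB_eq (n : Nat) : ∀ (rest : List Char) (i : Int) (vulns : List (List (String × String)))
    (h : i = PySem.Chars.find rest pvH3), rest.length ≤ n →
    pvGoB rest i vulns h =
      vulns ++ (if i = -1 then []
                else ((PySem.Chars.splitOn (rest.drop (i.toNat + 4)) pvH3).flatMap pvG)) := by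
  induction n with
  | zero =>
    intro rest i vulns h hlen
    have hrest : rest = [] := by
      cases rest with
      | nil => rfl
      | cons a t => simp at hlen
    subst hrest
    have hi : i = -1 := by rw [h]; exact pvFind_nil pvH3 (by decide)
    rw [pvGoB]
    simp [hi]
  | succ n ih =>
    intro rest i vulns h hlen
    by_cases hi : i = -1
    · rw [pvGoB]
      simp [hi]
    · subst h
      have h0 : 0 ≤ PySem.Chars.find rest pvH3 := by
        have := PySem.Chars.neg_one_le_find rest pvH3; omega
      have hsp := (PySem.Chars.find_spec (s := rest) (sub := pvH3) h0).1
      have hlen4 : (PySem.Chars.find rest pvH3).toNat + 4 ≤ rest.length := by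
        have := hsp.length_le
        rw [List.length_drop] at this
        have h4 : pvH3.length = 4 := rfl
        omega
      have hslice : PySem.List.slice rest (some (PySem.Chars.find rest pvH3 + 4)) none
          = rest.drop ((PySem.Chars.find rest pvH3).toNat + 4) := by
        rw [PySem.List.slice_from rest (show (0:Int) ≤ PySem.Chars.find rest pvH3 + 4 by omega)]
        congr 1
        omega
      rw [pvGoB, dif_neg hi]
      simp only []
      rw [ih _ _ _ rfl (by rw [hslice, List.length_drop]; omega)]
      rw [pvVulns_eq]
      rw [if_neg hi]
      simp only [hslice]
      by_cases hjn : PySem.Chars.find (rest.drop ((PySem.Chars.find rest pvH3).toNat + 4)) pvH3 = -1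
      · rw [if_pos hjn, pvSplitOn_neg _ hjn, if_pos hjn]
        simp
      · rw [if_neg hjn, if_neg hjn, pvSplitOn_pos _ hjn]
        have hj0 : 0 ≤ PySem.Chars.find (rest.drop ((PySem.Chars.find rest pvH3).toNat + 4)) pvH3 := by
          have := PySem.Chars.neg_one_le_find (rest.drop ((PySem.Chars.find rest pvH3).toNat + 4)) pvH3
          omega
        rw [PySem.List.slice_to _ hj0]
        simp

theorem parse_vulnerabilities_spec' (html : String) :
    parse_vulnerabilities html = parse_vulnerabilities_alt html := by
  have hlit : ("<h3>" : String).toList = pvH3 := rfl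
  have hB := pvGoB_eq html.toList.length html.toList (PySem.Str.find html "<h3>")
      [] (by rw [PySem.Str.find_eq]; rfl) le_rfl
  rw [parse_vulnerabilities_alt, hB]
  rw [parse_vulnerabilities]
  rw [PySem.Str.split?, PySem.Chars.split?]
  rw [if_neg (by decide)]
  simp only [hlit, Option.map_some]
  rw [PySem.List.slice_from _ (by norm_num : (0:Int) ≤ 1)]
  rw [show ((1:Int).toNat) = 1 from rfl]
  rw [← List.map_drop]
  rw [List.foldl_map]
  simp only [pvAstep]
  rw [PySem.List.foldl_append_eq_flatMap]
  rw [PySem.Str.find_eq, hlit]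
  by_cases hf : PySem.Chars.find html.toList pvH3 = -1
  · rw [if_pos hf, pvSplitOn_neg _ hf]
    simp
  · rw [if_neg hf, pvSplitOn_pos _ hf]
    simp

-- ===== VERDICT (by name: the statement is the Claim_ definition above) =====
theorem parse_vulnerabilities_spec : Claim_equal_parse_vulnerabilities := by
  intro html _
  unfold Spec_parse_vulnerabilities
  exact parse_vulnerabilities_spec' html
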